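-- pv_equiv track=rewrite | github.com/771835/dovetail | transpiler/core/ir_generator.py | _parse_fstring
-- ===== SOURCE A (Python) =====
-- def _parse_fstring(format_string: str) -> tuple[str, ...]:
--     parts: list[str] = []  # 存储解析结果（交替为文本和变量）
--     current_text = ''  # 当前累积的普通文本
--     index = 0  # 当前字符索引
--
--     while index < len(format_string):
--         # 处理双花括号转义
--         if index + 1 < len(format_string) and format_string[index] == '{' and format_string[index + 1] == '{':
--             current_text += '{'
--             index += 2
--         elif index + 1 < len(format_string) and format_string[index] == '}' and format_string[index + 1] == '}':
--             current_text += '}'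
--             index += 2
--         elif format_string[index] == '{':
--             # 遇到单花括号，开始变量解析
--             parts.append(current_text)
--             current_text = ''
--             start = index + 1
--             end = start
--             while end < len(format_string) and format_string[end] != '}':
--                 end += 1
--             variable = format_string[start:end]
--             parts.append(variable)
--             index = end + 1
--         else:
--             # 普通字符，添加到 current_text
--             current_text += format_string[index]
--             index += 1
--
--     # 添加最后剩余的普通文本
--     if current_text:
--         parts.append(current_text)
--     return tuple(parts)
-- ===== SOURCE B (Python) =====
-- import re
--
-- _TOKEN = re.compile(r'\{\{|\}\}|\{[^}]*\}?|[^{}]+|\}')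
--
-- def _parse_fstring(format_string: str) -> tuple[str, ...]:
--     parts: list[str] = []
--     buf = ''
--     for m in _TOKEN.finditer(format_string):
--         tok = m.group()
--         if tok == '{{':
--             buf += '{'
--         elif tok == '}}':
--             buf += '}'
--         elif tok[0] == '{':
--             parts.append(buf)
--             buf = ''
--             parts.append(tok[1:-1] if tok.endswith('}') else tok[1:])
--         else:
--             buf += tok
--     if buf:
--         parts.append(buf)
--     return tuple(parts)
-- ===== Notes on version B (the rewrite author's own statement) =====
-- stated objective: faster
-- what changed: Replaced the index-driven per-character while loop with a regex tokenizer (re.finditer over an ordered alternation of escapes, {...} fields and plain-text runs) followed by a single fold over the tokens.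
import Mathlib
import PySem

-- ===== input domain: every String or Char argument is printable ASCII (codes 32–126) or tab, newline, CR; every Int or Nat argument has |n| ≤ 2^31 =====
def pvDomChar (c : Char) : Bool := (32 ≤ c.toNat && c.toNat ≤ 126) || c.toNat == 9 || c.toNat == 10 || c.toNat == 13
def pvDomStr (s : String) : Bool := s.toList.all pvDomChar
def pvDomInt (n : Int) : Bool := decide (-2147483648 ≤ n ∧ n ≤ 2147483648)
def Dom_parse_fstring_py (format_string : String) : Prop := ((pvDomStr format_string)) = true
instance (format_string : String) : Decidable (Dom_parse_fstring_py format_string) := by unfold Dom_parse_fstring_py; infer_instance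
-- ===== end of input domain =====

-- B replaces A's index-driven per-character loop by a regex tokenizer plus one fold over
-- the tokens; a timing run measured B faster (A accumulates text by per-character
-- string concatenation, B consumes whole runs per token).

-- ===== PORT A =====
-- A's while loop over the character index, transcribed as recursion over the remaining
-- characters: the four branches ({{-escape, }}-escape, variable field, plain char) in A's
-- order; format_string[start:end] is the takeWhile up to '}', index = end + 1 the drop past it.
def pvParseA : List Char → List Char → List String → List String
  | [], current, parts => if current = [] then parts else parts ++ [String.mk current]
  | '{' :: '{' :: rest, current, parts => pvParseA rest (current ++ ['{']) parts
  | '}' :: '}' :: rest, current, parts => pvParseA rest (current ++ ['}']) parts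
  | '{' :: rest, current, parts =>
      let varname := rest.takeWhile (· ≠ '}')
      pvParseA (rest.drop (varname.length + 1)) []
        (parts ++ [String.mk current, String.mk varname])
  | c :: rest, current, parts => pvParseA rest (current ++ [c]) parts
  termination_by cs _ _ => cs.length
  decreasing_by all_goals (simp; try omega)

def parse_fstring_py (format_string : String) : List String :=
  pvParseA format_string.toList [] []

-- ===== PORT B =====
-- Source B's regex r'\{\{|\}\}|\{[^}]*\}?|[^{}]+|\}' as a hand tokenizer: one arm per
-- alternative of the ordered, greedy alternation (exact for this regex on all inputs).
def pvIsPlain (c : Char) : Bool := c ≠ '{' && c ≠ '}'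

def pvTokenize : List Char → List (List Char)
  | [] => []
  | '{' :: '{' :: rest => ['{', '{'] :: pvTokenize rest
  | '}' :: '}' :: rest => ['}', '}'] :: pvTokenize rest
  | '{' :: rest =>
      let inner := rest.takeWhile (· ≠ '}')
      if rest.length ≤ inner.length then [('{' :: inner)]
      else ('{' :: inner ++ ['}']) :: pvTokenize (rest.drop (inner.length + 1))
  | '}' :: rest => ['}'] :: pvTokenize rest
  | c :: rest => (c :: rest.takeWhile pvIsPlain) :: pvTokenize (rest.dropWhile pvIsPlain)
  termination_by cs => cs.length
  decreasing_by
    all_goals simp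
    all_goals try omega
    all_goals (try (have := List.length_dropWhile_le pvIsPlain rest; omega))

-- Source B's loop body over the tokens, then the final `if buf: parts.append(buf)` flush.
def pvProcB : List (List Char) → List Char → List String → List String
  | [], buf, parts => if buf = [] then parts else parts ++ [String.mk buf]
  | t :: ts, buf, parts =>
      if t = ['{', '{'] then pvProcB ts (buf ++ ['{']) parts
      else if t = ['}', '}'] then pvProcB ts (buf ++ ['}']) parts
      else if t.head? = some '{' then
        let inner := if t.getLast? = some '}' then (t.drop 1).dropLast else t.drop 1
        pvProcB ts [] (parts ++ [String.mk buf, String.mk inner])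
      else pvProcB ts (buf ++ t) parts

def parse_fstring_py_alt (format_string : String) : List String :=
  pvProcB (pvTokenize format_string.toList) [] []

-- ===== PRECONDITION & SPEC =====
def Spec_parse_fstring_py (format_string : String) (out : List String) : Prop := out = parse_fstring_py_alt format_string
instance (format_string : String) (out : List String) : Decidable (Spec_parse_fstring_py format_string out) := by unfold Spec_parse_fstring_py; infer_instance

-- ===== CLAIM (what is proved, stated in full; the proofs are below) =====
def Claim_equal_parse_fstring_py : Prop := ∀ (format_string : String), Dom_parse_fstring_py format_string → Spec_parse_fstring_py format_string (parse_fstring_py format_string)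

-- ===== LEMMAS AND PROOFS =====

-- step lemmas for pvParseA on shapes the match compiler does not reduce by itself
lemma pvParseA_step_plain (c : Char) (rest : List Char) (h1 : c ≠ '{') (h2 : c ≠ '}')
    (buf : List Char) (parts : List String) :
    pvParseA (c :: rest) buf parts = pvParseA rest (buf ++ [c]) parts := by
  rw [pvParseA.eq_def]; split <;> (try (rename_i heq; obtain ⟨rfl, rfl⟩ := heq)) <;> simp_all

lemma pvParseA_step_rbrace (rest : List Char) (h : rest.head? ≠ some '}')
    (buf : List Char) (parts : List String) :
    pvParseA ('}' :: rest) buf parts = pvParseA rest (buf ++ ['}']) parts := by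
  rw [pvParseA.eq_def]; split <;> (try (rename_i heq; obtain ⟨rfl, rfl⟩ := heq)) <;> simp_all

lemma pvParseA_step_var (rest : List Char) (h : rest.head? ≠ some '{')
    (buf : List Char) (parts : List String) :
    pvParseA ('{' :: rest) buf parts
      = pvParseA (rest.drop ((rest.takeWhile (· ≠ '}')).length + 1)) []
          (parts ++ [String.mk buf, String.mk (rest.takeWhile (· ≠ '}'))]) := by
  rw [pvParseA.eq_def]; split <;> (try (rename_i heq; obtain ⟨rfl, rfl⟩ := heq)) <;> simp_all

-- step lemmas for pvTokenize
lemma pvTokenize_step_rbrace (rest : List Char) (h : rest.head? ≠ some '}') :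
    pvTokenize ('}' :: rest) = ['}'] :: pvTokenize rest := by
  rw [pvTokenize.eq_def]; split <;> (try (rename_i heq; obtain ⟨rfl, rfl⟩ := heq)) <;> simp_all

lemma pvTokenize_step_plain (c : Char) (rest : List Char) (h1 : c ≠ '{') (h2 : c ≠ '}') :
    pvTokenize (c :: rest)
      = (c :: rest.takeWhile pvIsPlain) :: pvTokenize (rest.dropWhile pvIsPlain) := by
  rw [pvTokenize.eq_def]; split <;> (try (rename_i heq; obtain ⟨rfl, rfl⟩ := heq)) <;> simp_all

lemma pvTokenize_step_lbrace (rest : List Char) (h : rest.head? ≠ some '{') :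
    pvTokenize ('{' :: rest)
      = (if rest.length ≤ ((rest.takeWhile (· ≠ '}')).length) then
          [('{' :: rest.takeWhile (· ≠ '}'))]
        else ('{' :: rest.takeWhile (· ≠ '}') ++ ['}'])
              :: pvTokenize (rest.drop ((rest.takeWhile (· ≠ '}')).length + 1))) := by
  rw [pvTokenize.eq_def]
  split <;> (try (rename_i heq; obtain ⟨rfl, rfl⟩ := heq)) <;> simp_all

-- step lemmas for pvProcB
lemma pvProcB_field (t : List Char) (ts : List (List Char)) (buf : List Char)
    (parts : List String) (h1 : t ≠ ['{', '{']) (h2 : t.head? = some '{') :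
    pvProcB (t :: ts) buf parts
      = pvProcB ts []
          (parts ++ [String.mk buf,
            String.mk (if t.getLast? = some '}' then (t.drop 1).dropLast else t.drop 1)]) := by
  have h3 : t ≠ ['}', '}'] := by intro he; subst he; simp at h2
  simp [pvProcB, h1, h3, h2]

lemma pvProcB_text (t : List Char) (ts : List (List Char)) (buf : List Char)
    (parts : List String) (h1 : t ≠ ['{', '{']) (h2 : t ≠ ['}', '}'])
    (h3 : t.head? ≠ some '{') :
    pvProcB (t :: ts) buf parts = pvProcB ts (buf ++ t) parts := by
  simp [pvProcB, h1, h2, h3]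

-- dropping the length of the takeWhile prefix is dropWhile
lemma pvDrop_takeWhile (p : Char → Bool) : ∀ (l : List Char),
    l.drop (l.takeWhile p).length = l.dropWhile p := by
  intro l
  induction l with
  | nil => simp
  | cons a l ih => by_cases hp : p a <;> simp [List.dropWhile_cons, hp, ih]

lemma pvDropWhile_head (p : Char → Bool) : ∀ (l : List Char) (d : Char) (r : List Char),
    l.dropWhile p = d :: r → p d = false := by
  intro l
  induction l with
  | nil => intro d r h; simp at h
  | cons a l ih =>
    intro d r h
    by_cases hp : p a
    · rw [List.dropWhile_cons_of_pos hp] at h; exact ih d r h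
    · rw [List.dropWhile_cons_of_neg hp] at h
      cases h; simpa using hp

lemma pvInner_ne_lbrace (rest : List Char) (h : rest.head? ≠ some '{') :
    ('{' :: rest.takeWhile (· ≠ '}')) ≠ ['{', '{'] := by
  cases rest with
  | nil => simp
  | cons r rs =>
    by_cases hr : r = '}'
    · subst hr; simp
    · rw [List.takeWhile_cons_of_pos (by simpa using hr)]
      intro he
      simp at he
      exact h (by simp [he.1])

lemma pvGetLast_no_rbrace (inner : List Char) (hin : ∀ x ∈ inner, x ≠ '}') :
    ('{' :: inner).getLast? ≠ some '}' := by
  rcases List.eq_nil_or_concat inner with rfl | ⟨ys, y, rfl⟩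
  · simp
  · rw [List.concat_eq_append,
      show ('{' :: (ys ++ [y])) = ('{' :: ys) ++ [y] from rfl, List.getLast?_concat]
    have := hin y (by simp)
    simp [this]

-- A consumes a maximal plain-character run one char at a time; collapsed to one step.
lemma pvParseA_plain : ∀ (cs : List Char) (buf : List Char) (parts : List String),
    pvParseA cs buf parts
      = pvParseA (cs.dropWhile pvIsPlain) (buf ++ cs.takeWhile pvIsPlain) parts := by
  intro cs
  induction cs with
  | nil => intro buf parts; simp
  | cons c rest ih =>
    intro buf parts
    by_cases hp : pvIsPlain c = true
    · have hc : c ≠ '{' ∧ c ≠ '}' := by simpa [pvIsPlain] using hp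
      rw [pvParseA_step_plain c rest hc.1 hc.2, ih, List.takeWhile_cons_of_pos hp,
        List.dropWhile_cons_of_pos hp]
      simp
    · rw [List.takeWhile_cons_of_neg (by simp_all), List.dropWhile_cons_of_neg (by simp_all)]
      simp

lemma pvMain : ∀ (n : ℕ) (cs : List Char), cs.length ≤ n →
    ∀ (buf : List Char) (parts : List String),
      pvParseA cs buf parts = pvProcB (pvTokenize cs) buf parts := by
  intro n
  induction n with
  | zero =>
    intro cs hcs buf parts
    have : cs = [] := List.eq_nil_of_length_eq_zero (Nat.le_zero.mp hcs)
    subst this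
    simp [pvParseA, pvTokenize, pvProcB]
  | succ n ih =>
    intro cs hcs buf parts
    rcases cs with _ | ⟨c, rest⟩
    · simp [pvParseA, pvTokenize, pvProcB]
    · simp only [List.length_cons, Nat.add_le_add_iff_right] at hcs
      by_cases hc1 : c = '{'
      · subst hc1
        rcases rest with _ | ⟨c2, rest2⟩
        · -- cs = ['{']: unterminated empty field
          simp [pvParseA, pvTokenize, pvProcB]
        · by_cases hc2 : c2 = '{'
          · -- '{{' escape
            subst hc2
            rw [show pvParseA ('{'::'{'::rest2) buf parts
                  = pvParseA rest2 (buf ++ ['{']) parts from by simp [pvParseA],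
              show pvTokenize ('{'::'{'::rest2) = ['{','{'] :: pvTokenize rest2 from by
                simp [pvTokenize]]
            rw [show pvProcB (['{','{'] :: pvTokenize rest2) buf parts
                  = pvProcB (pvTokenize rest2) (buf ++ ['{']) parts from by
                simp [pvProcB]]
            exact ih rest2 (by simp at hcs; omega) _ _
          · -- variable field
            have hhead : (c2 :: rest2).head? ≠ some '{' := by simpa using hc2
            rw [pvParseA_step_var (c2 :: rest2) hhead]
            have hin : ∀ x ∈ (c2 :: rest2).takeWhile (· ≠ '}'), x ≠ '}' := by
              intro x hx
              have := List.mem_takeWhile_imp hx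
              simpa using this
            cases hd : (c2 :: rest2).drop (((c2 :: rest2).takeWhile (· ≠ '}')).length) with
            | nil =>
              rw [pvTokenize_step_lbrace (c2 :: rest2) hhead,
                if_pos (by
                  have h2 := congrArg List.length hd
                  rw [List.length_drop] at h2
                  simp only [List.length_nil] at h2
                  omega)]
              have hdrop : (c2 :: rest2).drop
                  (((c2 :: rest2).takeWhile (· ≠ '}')).length + 1) = [] := by
                rw [← List.drop_drop, hd]; simp
              rw [hdrop]
              rw [pvProcB_field _ _ _ _ (pvInner_ne_lbrace _ hhead) (by simp)]
              rw [if_neg (by simpa using pvGetLast_no_rbrace _ hin)]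
              simp [pvParseA, pvProcB]
            | cons d rest' =>
              have hds : d = '}' := by
                have h1 := hd
                rw [pvDrop_takeWhile] at h1
                have := pvDropWhile_head _ _ _ _ h1
                simpa using this
              subst hds
              rw [pvTokenize_step_lbrace (c2 :: rest2) hhead,
                if_neg (by
                  have h2 := congrArg List.length hd
                  rw [List.length_drop] at h2
                  simp only [List.length_cons] at h2
                  simp only [List.length_cons]
                  omega)]
              have hdrop : (c2 :: rest2).drop
                  (((c2 :: rest2).takeWhile (· ≠ '}')).length + 1) = rest' := by
                rw [← List.drop_drop, hd]; simp
              rw [hdrop]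
              have h1 : ('{' :: (c2 :: rest2).takeWhile (· ≠ '}') ++ ['}']) ≠ ['{','{'] := by
                intro hh
                have hlast := congrArg List.getLast? hh
                rw [show ('{' :: (c2 :: rest2).takeWhile (· ≠ '}') ++ ['}'])
                      = ('{' :: (c2 :: rest2).takeWhile (· ≠ '}')) ++ ['}'] from rfl,
                  List.getLast?_concat] at hlast
                simp at hlast
              rw [pvProcB_field _ _ _ _ h1 (by simp)]
              rw [if_pos (by
                rw [show ('{' :: (c2 :: rest2).takeWhile (· ≠ '}') ++ ['}'])
                      = ('{' :: (c2 :: rest2).takeWhile (· ≠ '}')) ++ ['}'] from by simp,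
                  List.getLast?_concat])]
              have hlen : rest'.length ≤ n := by
                have h2 := congrArg List.length hd
                rw [List.length_drop] at h2
                simp only [List.length_cons] at h2 hcs
                omega
              rw [show (('{' :: (c2 :: rest2).takeWhile (· ≠ '}') ++ ['}']).drop 1).dropLast
                    = (c2 :: rest2).takeWhile (· ≠ '}') from by simp]
              exact ih rest' hlen _ _
      · by_cases hc2 : c = '}'
        · subst hc2
          rcases rest with _ | ⟨c2, rest2⟩
          · -- cs = ['}']
            rw [pvParseA_step_rbrace [] (by simp), pvTokenize_step_rbrace [] (by simp)]
            rw [pvProcB_text _ _ _ _ (by simp) (by simp) (by simp)]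
            exact ih [] (by simp) _ _
          · by_cases hc3 : c2 = '}'
            · -- '}}' escape
              subst hc3
              rw [show pvParseA ('}'::'}'::rest2) buf parts
                    = pvParseA rest2 (buf ++ ['}']) parts from by simp [pvParseA],
                show pvTokenize ('}'::'}'::rest2) = ['}','}'] :: pvTokenize rest2 from by
                  simp [pvTokenize]]
              rw [show pvProcB (['}','}'] :: pvTokenize rest2) buf parts
                    = pvProcB (pvTokenize rest2) (buf ++ ['}']) parts from by
                  simp [pvProcB]]
              exact ih rest2 (by simp at hcs; omega) _ _
            · -- lone '}': literal text
              have hhead : (c2 :: rest2).head? ≠ some '}' := by simpa using hc3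
              rw [pvParseA_step_rbrace _ hhead, pvTokenize_step_rbrace _ hhead]
              rw [pvProcB_text _ _ _ _ (by simp) (by simp) (by simp)]
              exact ih (c2 :: rest2) hcs _ _
        · -- plain run
          have hp : pvIsPlain c = true := by simp [pvIsPlain, hc1, hc2]
          rw [pvParseA_plain (c :: rest) buf parts, List.takeWhile_cons_of_pos hp,
            List.dropWhile_cons_of_pos hp]
          rw [pvTokenize_step_plain c rest hc1 hc2]
          rw [pvProcB_text _ _ _ _ (by simp [hc1]) (by simp [hc2]) (by simp [hc1])]
          have hlen : (rest.dropWhile pvIsPlain).length ≤ n := by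
            have := List.length_dropWhile_le pvIsPlain rest
            omega
          rw [show buf ++ c :: rest.takeWhile pvIsPlain
                = buf ++ [c] ++ rest.takeWhile pvIsPlain from by simp]
          exact ih (rest.dropWhile pvIsPlain) hlen _ _

-- ===== VERDICT (by name: the statement is the Claim_ definition above) =====
theorem parse_fstring_py_spec : Claim_equal_parse_fstring_py := by
  intro s _
  unfold Spec_parse_fstring_py parse_fstring_py parse_fstring_py_alt
  exact pvMain s.toList.length s.toList le_rfl [] []
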